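-- pv_equiv track=rewrite | github.com/aorursy/KT_dataset_py | kiri8128_kernelc9ba1a26c1.py | difList
-- ===== SOURCE A (Python) =====
-- def difList(a, b):
--     # 共通部分を除いたときの左右それぞれの残存数
--     # ただしどちらも空の場合は-1,-1を返す
--     if len(a) + len(b) == 0:
--         return -1, -1
--     for aa in a:
--         if aa in b:
--             a.remove(aa)
--             b.remove(aa)
--             return difList(a, b)
--     for bb in b:
--         if bb in a:
--             a.remove(bb)
--             b.remove(bb)
--             return difList(a, b)
--     return len(a), len(b)
-- ===== SOURCE B (Python) =====
-- def difList(a, b):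
--     # Single pass: match each element of a against a working copy of b.
--     # (Return value only: unlike A, this does not mutate a or b.)
--     rest = list(b)
--     ra = 0
--     for x in a:
--         if x in rest:
--             rest.remove(x)
--         else:
--             ra += 1
--     if ra == 0 and not rest:
--         return -1, -1
--     return ra, len(rest)
-- ===== Notes on version B (the rewrite author's own statement) =====
-- stated objective: faster
-- what changed: Replaces A's restart-from-scratch recursion (which rescans both lists after every single removal) by one linear walk over a that consumes matches from a working copy of b, returning the two leftover counts directly.
import Mathlib
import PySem

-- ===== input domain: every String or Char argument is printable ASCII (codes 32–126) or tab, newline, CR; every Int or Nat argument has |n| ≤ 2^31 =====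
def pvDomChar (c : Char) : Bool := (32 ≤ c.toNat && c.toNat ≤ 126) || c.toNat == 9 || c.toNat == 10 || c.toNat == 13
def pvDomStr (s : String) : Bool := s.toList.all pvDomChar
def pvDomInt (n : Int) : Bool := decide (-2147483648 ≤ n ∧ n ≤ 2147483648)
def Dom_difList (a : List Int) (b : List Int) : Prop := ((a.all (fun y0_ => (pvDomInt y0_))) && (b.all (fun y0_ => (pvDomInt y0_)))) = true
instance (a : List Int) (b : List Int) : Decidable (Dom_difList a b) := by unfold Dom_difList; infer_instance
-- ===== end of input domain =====

-- B replaces A's restart-after-every-removal recursion by a single pass over `a`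
-- consuming matches from a copy of `b` (faster in a timing run; return value
-- only: A mutates its arguments in place, B does not).

-- ===== PORT A =====
-- `x.remove(v)` on a present element deletes the first occurrence = List.erase
-- (PySem.List.remove?_eq_some_erase); the for-loops with early return = List.find?.
def difList (a : List Int) (b : List Int) : List Int :=
  if a.length + b.length = 0 then [-1, -1]
  else
    match h : a.find? (fun aa => decide (aa ∈ b)) with
    | some aa => difList (a.erase aa) (b.erase aa)
    | none =>
      match h2 : b.find? (fun bb => decide (bb ∈ a)) with
      | some bb => difList (a.erase bb) (b.erase bb)
      | none => [(a.length : Int), (b.length : Int)]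
termination_by a.length + b.length
decreasing_by
  · have ha : aa ∈ a := List.mem_of_find?_eq_some h
    have hb : aa ∈ b := by have := List.find?_some h; simpa using this
    have h1 := List.length_erase_of_mem ha
    have h2 := List.length_erase_of_mem hb
    have h3 := List.length_pos_of_mem ha
    omega
  · have hb : bb ∈ b := List.mem_of_find?_eq_some h2
    have ha : bb ∈ a := by have := List.find?_some h2; simpa using this
    have h1 := List.length_erase_of_mem ha
    have h3 := List.length_erase_of_mem hb
    have h4 := List.length_pos_of_mem ha
    omega

-- ===== PORT B =====
-- single pass: state (rest, ra); `rest.remove(x)` on a present element = List.erase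
def difList_alt (a : List Int) (b : List Int) : List Int :=
  let s := a.foldl
    (fun (st : List Int × Int) x =>
      if x ∈ st.1 then (st.1.erase x, st.2) else (st.1, st.2 + 1))
    (b, 0)
  if s.2 = 0 ∧ s.1 = [] then [-1, -1] else [s.2, (s.1.length : Int)]

-- ===== PRECONDITION & SPEC =====
def Spec_difList (a : List Int) (b : List Int) (out : List Int) : Prop := out = difList_alt a b
instance (a : List Int) (b : List Int) (out : List Int) : Decidable (Spec_difList a b out) := by unfold Spec_difList; infer_instance

-- ===== CLAIM (what is proved, stated in full; the proofs are below) =====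
def Claim_equal_difList : Prop := ∀ (a : List Int) (b : List Int), Dom_difList a b → Spec_difList a b (difList a b)

-- ===== LEMMAS AND PROOFS =====

-- proof-only specification: both ports return the two multiset-difference cardinalities
def dspec (a b : List Int) : List Int :=
  if ((↑a : Multiset Int) - ↑b).card = 0 ∧ ((↑b : Multiset Int) - ↑a).card = 0 then [-1, -1]
  else [(((↑a : Multiset Int) - ↑b).card : Int), (((↑b : Multiset Int) - ↑a).card : Int)]

theorem fold_inv (a : List Int) : ∀ (rest : List Int) (r : Int),
    (a.foldl (fun (st : List Int × Int) x =>
        if x ∈ st.1 then (st.1.erase x, st.2) else (st.1, st.2 + 1)) (rest, r)).2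
      = r + (((↑a : Multiset Int) - ↑rest).card : Int)
    ∧ (↑(a.foldl (fun (st : List Int × Int) x =>
        if x ∈ st.1 then (st.1.erase x, st.2) else (st.1, st.2 + 1)) (rest, r)).1 : Multiset Int)
      = (↑rest : Multiset Int) - ↑a := by
  induction a with
  | nil => intro rest r; simp
  | cons x a ih =>
    intro rest r
    by_cases hx : x ∈ rest
    · have hc : 1 ≤ rest.count x := List.one_le_count_iff.mpr hx
      have hsub : ((↑a : Multiset Int) - ↑(rest.erase x)) = ((↑(x :: a) : Multiset Int) - ↑rest) := by
        ext v
        by_cases hv : v = x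
        · subst hv
          simp [List.count_diff, List.count_erase_self]
          omega
        · have hv' : ¬ x = v := fun h => hv h.symm
          simp [List.count_diff, List.count_erase_of_ne hv, List.count_cons, hv']
      have hrest : ((↑(rest.erase x) : Multiset Int) - ↑a) = ((↑rest : Multiset Int) - ↑(x :: a)) := by
        ext v
        by_cases hv : v = x
        · subst hv
          simp [List.count_diff, List.count_erase_self]
        · have hv' : ¬ x = v := fun h => hv h.symm
          simp [List.count_diff, List.count_erase_of_ne hv, List.count_cons, hv']
      obtain ⟨h1, h2⟩ := ih (rest.erase x) r
      refine ⟨?_, ?_⟩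
      · simp only [List.foldl_cons, if_pos hx]
        rw [h1, hsub]
      · simp only [List.foldl_cons, if_pos hx]
        rw [h2, hrest]
    · have hc : rest.count x = 0 := List.count_eq_zero_of_not_mem hx
      have hsub : ((↑(x :: a) : Multiset Int) - ↑rest) = x ::ₘ ((↑a : Multiset Int) - ↑rest) := by
        ext v
        by_cases hv : v = x
        · subst hv
          simp [List.count_diff, hc]
        · have hv' : ¬ x = v := fun h => hv h.symm
          simp [List.count_diff, List.count_cons, Multiset.count_cons, hv']
      have hrest : ((↑rest : Multiset Int) - ↑(x :: a)) = ((↑rest : Multiset Int) - ↑a) := by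
        ext v
        by_cases hv : v = x
        · subst hv
          simp [List.count_diff, hc]
        · have hv' : ¬ x = v := fun h => hv h.symm
          simp [List.count_diff, List.count_cons, List.count_erase_of_ne hv, hv']
      obtain ⟨h1, h2⟩ := ih rest (r + 1)
      refine ⟨?_, ?_⟩
      · simp only [List.foldl_cons, if_neg hx]
        rw [h1, hsub]
        push_cast [Multiset.card_cons]
        ring
      · simp only [List.foldl_cons, if_neg hx]
        rw [h2, hrest]

theorem alt_eq_dspec (a b : List Int) : difList_alt a b = dspec a b := by
  unfold difList_alt dspec
  obtain ⟨h1, h2⟩ := fold_inv a b 0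
  set s := a.foldl (fun (st : List Int × Int) x =>
      if x ∈ st.1 then (st.1.erase x, st.2) else (st.1, st.2 + 1)) (b, 0) with hs
  have hnil : s.1 = [] ↔ ((↑b : Multiset Int) - ↑a).card = 0 := by
    rw [Multiset.card_eq_zero, ← h2, Multiset.coe_eq_zero]
  have h2' : s.2 = 0 ↔ ((↑a : Multiset Int) - ↑b).card = 0 := by
    rw [h1]; omega
  by_cases hc : ((↑a : Multiset Int) - ↑b).card = 0 ∧ ((↑b : Multiset Int) - ↑a).card = 0
  · rw [if_pos ⟨h2'.2 hc.1, hnil.2 hc.2⟩, if_pos hc]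
  · rw [if_neg (by rw [h2', hnil]; exact hc), if_neg hc]
    have hlen : (s.1.length : Int) = (((↑b : Multiset Int) - ↑a).card : Int) := by
      have : (↑s.1 : Multiset Int).card = ((↑b : Multiset Int) - ↑a).card := by rw [h2]
      simpa using this
    rw [h1, hlen]
    simp

theorem sub_erase_erase (a b : List Int) (x : Int) (ha : x ∈ a) (hb : x ∈ b) :
    ((↑(a.erase x) : Multiset Int) - ↑(b.erase x)) = ((↑a : Multiset Int) - ↑b) := by
  have hca : 1 ≤ a.count x := List.one_le_count_iff.mpr ha
  have hcb : 1 ≤ b.count x := List.one_le_count_iff.mpr hb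
  ext v
  by_cases hv : v = x
  · subst hv
    simp [List.count_diff, List.count_erase_self]
    omega
  · simp [List.count_diff, List.count_erase_of_ne hv]

theorem sub_disjoint (a b : List Int) (h : ∀ x ∈ a, x ∉ b) :
    ((↑a : Multiset Int) - ↑b) = (↑a : Multiset Int) := by
  ext v
  by_cases hv : v ∈ a
  · have : b.count v = 0 := List.count_eq_zero_of_not_mem (h v hv)
    simp [List.count_diff, this]
  · have : a.count v = 0 := List.count_eq_zero_of_not_mem hv
    simp [List.count_diff, this]

theorem A_eq_dspec (a b : List Int) : difList a b = dspec a b := by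
  fun_induction difList a b with
  | case1 a b hz =>
    have ha : a = [] := by cases a <;> simp_all
    have hb : b = [] := by cases b <;> simp_all
    subst ha; subst hb
    simp [dspec]
  | case2 a b hz aa h ih =>
    have ha : aa ∈ a := List.mem_of_find?_eq_some h
    have hb : aa ∈ b := by have := List.find?_some h; simpa using this
    rw [ih, dspec, dspec, sub_erase_erase a b aa ha hb, sub_erase_erase b a aa hb ha]
  | case3 a b hz h bb h2 ih =>
    exfalso
    have hb : bb ∈ b := List.mem_of_find?_eq_some h2
    have ha : bb ∈ a := by have := List.find?_some h2; simpa using this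
    have := List.find?_eq_none.1 h bb ha
    simp at this
    exact this hb
  | case4 a b hz h h2 =>
    have hdisj : ∀ x ∈ a, x ∉ b := by
      intro x hx
      have := List.find?_eq_none.1 h x hx
      simpa using this
    have hdisj' : ∀ x ∈ b, x ∉ a := fun x hx hxa => hdisj x hxa hx
    rw [dspec, sub_disjoint a b hdisj, sub_disjoint b a hdisj']
    rw [if_neg]
    · simp
    · simp only [Multiset.coe_card]
      omega

-- ===== VERDICT (by name: the statement is the Claim_ definition above) =====
theorem difList_spec : Claim_equal_difList := by
  intro a b _
  unfold Spec_difList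
  rw [A_eq_dspec, alt_eq_dspec]
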